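-- pv_equiv track=rewrite | github.com/RobbeW/Data_Statistiek_R | Deel 3 Algoritmiek/02 Dictionaries/Evaluatie/10 Lengte van de palindroom/solution/solution.nl.py | langste_palindroom
-- ===== SOURCE A (Python) =====
-- def langste_palindroom(letters):
--     telling = {}
--
--     for letter in letters:
--         if letter in telling:
--             telling[letter] += 1
--         else:
--             telling[letter] = 1
--
--     aantal = 0
--     is_oneven = False
--     for _, resultaat in telling.items():
--         aantal += (resultaat // 2) * 2
--         if resultaat % 2 == 1:
--             is_oneven = True
--
--     totale_aantal = aantal + is_oneven
--     return totale_aantal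
-- ===== SOURCE B (Python) =====
-- def langste_palindroom(letters):
--     odd = set()
--     total = 0
--     for letter in letters:
--         if letter in odd:
--             odd.discard(letter)
--         else:
--             odd.add(letter)
--         total += 1
--     return total - len(odd) + (1 if odd else 0)
-- ===== Notes on version B (the rewrite author's own statement) =====
-- stated objective: alternative
-- what changed: Replaces the frequency dict plus a second summation loop by a single pass that toggles a parity set and counts letters, deriving the answer as total - #odd-parity chars + (1 if any odd).
import Mathlib
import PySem

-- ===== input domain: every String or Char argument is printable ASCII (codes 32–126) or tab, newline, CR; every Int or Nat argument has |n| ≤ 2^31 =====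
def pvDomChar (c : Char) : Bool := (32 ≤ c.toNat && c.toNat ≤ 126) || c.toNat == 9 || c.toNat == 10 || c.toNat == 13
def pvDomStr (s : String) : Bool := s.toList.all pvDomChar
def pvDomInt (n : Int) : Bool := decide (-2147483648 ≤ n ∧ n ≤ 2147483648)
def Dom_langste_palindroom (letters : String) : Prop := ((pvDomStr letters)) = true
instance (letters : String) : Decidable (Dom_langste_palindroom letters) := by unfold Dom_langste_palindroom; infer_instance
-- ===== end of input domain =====

-- B replaces A's frequency dict plus its second summation loop by a single pass that
-- toggles a parity set and counts letters (total - #odd-parity chars + 1 if any odd);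
-- an alternative decomposition of the same O(n) task.

-- ===== PORT A =====
def langste_palindroom (letters : String) : Int :=
  let telling := letters.toList.foldl
    (fun (d : PySem.Dict Char Int) letter =>
      if d.contains letter then d.insert letter (d.getD letter 0 + 1)
      else d.insert letter 1) PySem.Dict.empty
  let st := telling.items.foldl
    (fun (st : Int × Bool) kv =>
      (st.1 + PySem.Int.floordiv kv.2 2 * 2,
       if PySem.Int.mod kv.2 2 = 1 then true else st.2)) (0, false)
  st.1 + (if st.2 then 1 else 0)

-- ===== PORT B =====
def langste_palindroom_alt (letters : String) : Int :=
  let st := letters.toList.foldl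
    (fun (st : PySem.Set Char × Int) letter =>
      ((if PySem.Set.contains st.1 letter then PySem.Set.discard st.1 letter
        else PySem.Set.add st.1 letter), st.2 + 1)) (PySem.Set.empty, 0)
  st.2 - PySem.Set.len st.1 + (if st.1 = [] then 0 else 1)

-- ===== PRECONDITION & SPEC =====
def Spec_langste_palindroom (letters : String) (out : Int) : Prop := out = langste_palindroom_alt letters
instance (letters : String) (out : Int) : Decidable (Spec_langste_palindroom letters out) := by unfold Spec_langste_palindroom; infer_instance

-- ===== CLAIM (what is proved, stated in full; the proofs are below) =====
def Claim_equal_langste_palindroom : Prop := ∀ (letters : String), Dom_langste_palindroom letters → Spec_langste_palindroom letters (langste_palindroom letters)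

-- ===== LEMMAS AND PROOFS =====

def pvToggle (s : PySem.Set Char) (c : Char) : PySem.Set Char :=
  if PySem.Set.contains s c then PySem.Set.discard s c else PySem.Set.add s c
def pvOdds (l : List Char) : PySem.Set Char := l.foldl pvToggle []

lemma mem_pvToggle_self (s : PySem.Set Char) (c : Char) : c ∈ pvToggle s c ↔ c ∉ s := by
  by_cases h : c ∈ s <;>
    simp [pvToggle, PySem.Set.contains_iff, h, PySem.Set.mem_discard, PySem.Set.mem_add]

lemma mem_pvToggle_ne (s : PySem.Set Char) {c c0 : Char} (h : c ≠ c0) :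
    c ∈ pvToggle s c0 ↔ c ∈ s := by
  by_cases h0 : c0 ∈ s <;>
    simp [pvToggle, PySem.Set.contains_iff, h0, PySem.Set.mem_discard, PySem.Set.mem_add, h]

lemma nodup_pvToggle (s : PySem.Set Char) (c : Char) (hs : s.Nodup) : (pvToggle s c).Nodup := by
  unfold pvToggle
  split
  · exact PySem.Set.nodup_discard s c hs
  · exact PySem.Set.nodup_add s c hs

lemma nodup_foldl_pvToggle (l : List Char) (s : PySem.Set Char) (hs : s.Nodup) :
    (l.foldl pvToggle s).Nodup := by
  induction l generalizing s with
  | nil => exact hs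
  | cons c l ih => exact ih _ (nodup_pvToggle s c hs)

lemma mem_foldl_pvToggle (l : List Char) (s : PySem.Set Char) (c : Char) :
    c ∈ l.foldl pvToggle s ↔ ((c ∈ s) ↔ l.count c % 2 = 0) := by
  induction l generalizing s with
  | nil => simp
  | cons c0 l ih =>
    simp only [List.foldl_cons]
    rw [ih]
    by_cases h : c = c0
    · subst h
      rw [mem_pvToggle_self]
      simp only [List.count_cons_self]
      by_cases hc : c ∈ s <;> simp [hc] <;> omega
    · rw [mem_pvToggle_ne s h, List.count_cons_of_ne (Ne.symm h)]

lemma mem_pvOdds (l : List Char) (c : Char) : c ∈ pvOdds l ↔ l.count c % 2 = 1 := by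
  rw [pvOdds, mem_foldl_pvToggle]
  simp only [List.not_mem_nil, false_iff]
  omega

lemma foldB_eq (l : List Char) (s : PySem.Set Char) (t : Int) :
    l.foldl (fun (st : PySem.Set Char × Int) letter =>
      ((if PySem.Set.contains st.1 letter then PySem.Set.discard st.1 letter
        else PySem.Set.add st.1 letter), st.2 + 1)) (s, t)
    = (l.foldl pvToggle s, t + l.length) := by
  induction l generalizing s t with
  | nil => simp
  | cons c l ih =>
    simp only [List.foldl_cons, ih, pvToggle, List.length_cons]
    rw [Prod.mk.injEq]
    exact ⟨rfl, by push_cast; ring⟩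

lemma foldA_counter (l : List Char) :
    l.foldl (fun (d : PySem.Dict Char Int) letter =>
      if d.contains letter then d.insert letter (d.getD letter 0 + 1)
      else d.insert letter 1) PySem.Dict.empty = PySem.Dict.counter l := by
  rw [← PySem.Dict.foldl_insert_getD_add_one_eq_counter]
  congr 1
  funext d c
  by_cases h : d.contains c
  · simp [h]
  · rw [if_neg (by simp [h]), PySem.Dict.getD_of_not_contains d 0 (by simpa using h)]
    norm_num

lemma foldA_sum (xs : List (Char × Int)) (a : Int) (b : Bool) :
    xs.foldl (fun (st : Int × Bool) kv =>
      (st.1 + PySem.Int.floordiv kv.2 2 * 2,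
       if PySem.Int.mod kv.2 2 = 1 then true else st.2)) (a, b)
    = (a + (xs.map (fun kv => PySem.Int.floordiv kv.2 2 * 2)).sum,
       b || xs.any (fun kv => PySem.Int.mod kv.2 2 == 1)) := by
  induction xs generalizing a b with
  | nil => simp
  | cons kv xs ih =>
    simp only [List.foldl_cons, ih, List.map_cons, List.sum_cons, List.any_cons]
    rw [Prod.mk.injEq]
    refine ⟨by ring, ?_⟩
    by_cases h : PySem.Int.mod kv.2 2 = 1
    · have hb : (PySem.Int.mod kv.2 2 == 1) = true := beq_iff_eq.mpr h
      rw [if_pos h, hb]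
      simp
    · have hb : (PySem.Int.mod kv.2 2 == 1) = false := by simpa using h
      rw [if_neg h, hb, Bool.false_or]

lemma sum_pairs (l : List Char) (S : List Char) :
    ((S.map (fun k => (k, (l.count k : Int)))).map
        (fun kv => PySem.Int.floordiv kv.2 2 * 2)).sum
    = ((S.map fun k => (l.count k : Int)).sum
        - (S.countP (fun k => l.count k % 2 == 1) : Int)) := by
  induction S with
  | nil => simp
  | cons k S ih =>
    simp only [List.map_cons, List.sum_cons, ih, List.countP_cons]
    have h1 : PySem.Int.floordiv ((l.count k : Int)) 2 * 2
        = ((l.count k / 2 * 2 : Nat) : Int) := by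
      rw [show ((2:Int)) = ((2:Nat):Int) by norm_num, PySem.Int.floordiv_natCast]
      push_cast; ring
    rw [h1]
    by_cases h : l.count k % 2 = 1 <;> simp [h] <;> omega

lemma sum_counts (l : List Char) :
    ((PySem.Set.ofList l).map fun k => (l.count k : Int)).sum = (l.length : Int) := by
  have hperm : (PySem.Set.ofList l).Perm l.dedup := by
    rw [List.perm_ext_iff_of_nodup (PySem.Set.nodup_ofList l) l.nodup_dedup]
    intro a
    rw [PySem.Set.mem_ofList, List.mem_dedup]
  have := (hperm.map (fun k => (l.count k : Int))).sum_eq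
  rw [this]
  rw [show (fun k => (l.count k : Int))
        = ((fun n : Nat => (n : Int)) ∘ fun k => List.count k l) from rfl,
      ← List.map_map, ← Nat.cast_list_sum, List.sum_map_count_dedup_eq_length]

lemma mod_flag (n : Nat) : ((PySem.Int.mod ((n : Int)) 2 == 1) = true) ↔ n % 2 = 1 := by
  rw [beq_iff_eq, show ((2:Int)) = ((2:Nat):Int) by norm_num, PySem.Int.mod_natCast]
  exact_mod_cast Iff.rfl

lemma length_pvOdds (l : List Char) :
    ((pvOdds l).length : Int) = ((PySem.Set.ofList l).countP (fun k => l.count k % 2 == 1) : Int) := by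
  have hperm : (pvOdds l).Perm ((PySem.Set.ofList l).filter (fun k => l.count k % 2 == 1)) := by
    rw [pvOdds, List.perm_ext_iff_of_nodup (nodup_foldl_pvToggle l [] (by simp))
        ((PySem.Set.nodup_ofList l).filter _)]
    intro k
    rw [← pvOdds, mem_pvOdds, List.mem_filter, PySem.Set.mem_ofList]
    constructor
    · intro h
      exact ⟨List.count_pos_iff.mp (by omega), by simpa using h⟩
    · intro ⟨_, h⟩
      simpa using h
  rw [hperm.length_eq, List.countP_eq_length_filter]

lemma pvOdds_empty_iff (l : List Char) :
    (pvOdds l = []) ↔ ((PySem.Set.ofList l).any (fun k => PySem.Int.mod ((l.count k : Int)) 2 == 1) = false) := by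
  rw [List.eq_nil_iff_forall_not_mem]
  rw [← Bool.not_eq_true, List.any_eq_true]
  constructor
  · intro h ⟨k, hk, hflag⟩
    exact h k ((mem_pvOdds l k).mpr ((mod_flag _).mp hflag))
  · intro h k hk
    rw [mem_pvOdds] at hk
    exact h ⟨k, PySem.Set.mem_ofList l k |>.mpr (List.count_pos_iff.mp (by omega)), (mod_flag _).mpr hk⟩

-- ===== VERDICT (by name: the statement is the Claim_ definition above) =====
theorem langste_palindroom_spec : Claim_equal_langste_palindroom := by
  intro letters _
  unfold Spec_langste_palindroom
  simp only [langste_palindroom, langste_palindroom_alt, foldA_counter, foldB_eq,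
    PySem.Dict.items_counter, foldA_sum, sum_pairs, List.any_map, Function.comp_def, Bool.false_or]
  rw [show (List.foldl pvToggle PySem.Set.empty letters.toList) = pvOdds letters.toList from rfl,
      sum_counts]
  set l := letters.toList
  rw [show PySem.Set.len (pvOdds l) = ((pvOdds l).length : Int) from rfl]
  rw [length_pvOdds]
  by_cases h : pvOdds l = []
  · rw [if_pos h, ((pvOdds_empty_iff l).mp h : _)]
    simp
  · rw [if_neg h]
    have hany : ((PySem.Set.ofList l).any (fun k => PySem.Int.mod ((l.count k : Int)) 2 == 1)) = true := by
      cases hb : ((PySem.Set.ofList l).any (fun k => PySem.Int.mod ((l.count k : Int)) 2 == 1)) with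
      | false => exact absurd ((pvOdds_empty_iff l).mpr hb) h
      | true => rfl
    rw [hany]
    simp
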